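-- pv_equiv track=rewrite | github.com/wordslab-org/wordslab-notebooks | dashboard/dashboard.py | map_paths_to_devices
-- ===== SOURCE A (Python) =====
-- def map_paths_to_devices(wordslab_paths, mountpoints):
--     wordslab_paths_devices = {}
--     sorted_mountpoints = sorted(mountpoints.keys(), key=len, reverse=True)
--     for path in wordslab_paths:
--         for mountpoint in sorted_mountpoints:
--             if path.startswith(mountpoint):
--                 device = mountpoints[mountpoint]
--                 if device not in wordslab_paths_devices:
--                     wordslab_paths_devices[device] = [path]
--                 else:
--                     wordslab_paths_devices[device].append(path)
--                 break
--     return wordslab_paths_devices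
-- ===== SOURCE B (Python) =====
-- def map_paths_to_devices(wordslab_paths, mountpoints):
--     wordslab_paths_devices = {}
--     for path in wordslab_paths:
--         best = None
--         for mountpoint, device in mountpoints.items():
--             if path.startswith(mountpoint) and (best is None or len(best[0]) < len(mountpoint)):
--                 best = (mountpoint, device)
--         if best is not None:
--             wordslab_paths_devices.setdefault(best[1], []).append(path)
--     return wordslab_paths_devices
-- ===== Notes on version B (the rewrite author's own statement) =====
-- stated objective: alternative
-- what changed: B drops A's length-descending sort of the mountpoint keys and its dict lookup of the chosen key: each path is matched in one scan over the mountpoint items that keeps the longest matching (mountpoint, device) pair, and grouping uses setdefault.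
import Mathlib
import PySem

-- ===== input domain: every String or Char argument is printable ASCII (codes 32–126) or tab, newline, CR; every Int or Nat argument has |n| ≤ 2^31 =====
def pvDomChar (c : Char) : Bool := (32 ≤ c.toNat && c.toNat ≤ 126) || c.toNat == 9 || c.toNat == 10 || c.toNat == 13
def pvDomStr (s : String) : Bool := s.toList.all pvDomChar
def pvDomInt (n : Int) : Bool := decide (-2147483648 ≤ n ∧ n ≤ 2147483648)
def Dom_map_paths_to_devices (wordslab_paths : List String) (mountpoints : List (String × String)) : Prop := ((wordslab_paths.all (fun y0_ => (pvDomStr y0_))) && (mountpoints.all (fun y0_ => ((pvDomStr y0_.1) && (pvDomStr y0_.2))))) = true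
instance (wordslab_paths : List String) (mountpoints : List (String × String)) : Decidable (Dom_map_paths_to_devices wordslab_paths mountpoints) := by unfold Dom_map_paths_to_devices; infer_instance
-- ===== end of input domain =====

-- B replaces A's sort-then-first-match by a single scan per path that keeps the longest
-- matching mountpoint, and groups with setdefault; objective: alternative (the sort disappears).

-- ===== PORT A =====
-- inner 'for mountpoint in sorted_mountpoints: if path.startswith(mountpoint): …; break'
-- = find? of the first match, then the body once; 'mountpoints[mountpoint]' always succeeds
-- (the key comes from mountpoints.keys()), ported as get? with a default never used.
def pyAStep (mps : PySem.Dict String String) (sorted_mountpoints : List String)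
    (acc : PySem.Dict String (List String)) (path : String) : PySem.Dict String (List String) :=
  match sorted_mountpoints.find? (fun m => PySem.Str.startswith path m) with
  | none => acc
  | some mountpoint =>
      let device := (mps.get? mountpoint).getD ""
      if acc.contains device then acc.modify device [] (· ++ [path])
      else acc.insert device [path]

def map_paths_to_devices (wordslab_paths : List String) (mountpoints : List (String × String)) : List (String × List String) :=
  let mps := PySem.Dict.ofList mountpoints
  let sorted_mountpoints := PySem.List.sorted mps.keys (fun s => PySem.Str.len s) true
  (wordslab_paths.foldl (pyAStep mps sorted_mountpoints) PySem.Dict.empty).items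

-- ===== PORT B =====
-- 'best = None; for mountpoint, device in mountpoints.items(): if …: best = (mountpoint, device)'
def pyBmStep (path : String) (best : Option (String × String)) (p : String × String) : Option (String × String) :=
  if PySem.Str.startswith path p.1 &&
      (match best with
       | none => true
       | some b => decide (PySem.Str.len b.1 < PySem.Str.len p.1)) then
    some p
  else best

def pyBestMatch (path : String) (items : List (String × String)) : Option (String × String) :=
  items.foldl (pyBmStep path) none

def map_paths_to_devices_alt (wordslab_paths : List String) (mountpoints : List (String × String)) : List (String × List String) :=
  let items := (PySem.Dict.ofList mountpoints).items
  (wordslab_paths.foldl (fun acc path =>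
      match pyBestMatch path items with
      | none => acc
      | some best => acc.modify best.2 [] (· ++ [path]))  -- setdefault(best[1], []).append(path)
    PySem.Dict.empty).items

-- ===== PRECONDITION & SPEC =====
def Spec_map_paths_to_devices (wordslab_paths : List String) (mountpoints : List (String × String)) (out : List (String × List String)) : Prop := out = map_paths_to_devices_alt wordslab_paths mountpoints
instance (wordslab_paths : List String) (mountpoints : List (String × String)) (out : List (String × List String)) : Decidable (Spec_map_paths_to_devices wordslab_paths mountpoints out) := by unfold Spec_map_paths_to_devices; infer_instance

-- ===== CLAIM (what is proved, stated in full; the proofs are below) =====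
def Claim_equal_map_paths_to_devices : Prop := ∀ (wordslab_paths : List String) (mountpoints : List (String × String)), Dom_map_paths_to_devices wordslab_paths mountpoints → Spec_map_paths_to_devices wordslab_paths mountpoints (map_paths_to_devices wordslab_paths mountpoints)

-- ===== LEMMAS AND PROOFS =====

-- small stepping lemmas for pyBmStep
theorem pv_bmStep_no {path : String} (s : Option (String × String)) {p : String × String}
    (h : PySem.Str.startswith path p.1 = false) : pyBmStep path s p = s := by
  unfold pyBmStep; rw [h]; simp

theorem pv_bmStep_none {path : String} {p : String × String}
    (h : PySem.Str.startswith path p.1 = true) : pyBmStep path none p = some p := by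
  unfold pyBmStep; rw [h]; simp

theorem pv_bmStep_lt {path : String} {b p : String × String}
    (h : PySem.Str.startswith path p.1 = true)
    (hlt : PySem.Str.len b.1 < PySem.Str.len p.1) : pyBmStep path (some b) p = some p := by
  unfold pyBmStep; rw [h]
  show (if (true && decide (PySem.Str.len b.1 < PySem.Str.len p.1)) = true then some p else some b) = some p
  rw [decide_eq_true hlt]
  simp

theorem pv_bmStep_ge {path : String} {b p : String × String}
    (h : PySem.Str.startswith path p.1 = true)
    (hge : PySem.Str.len p.1 ≤ PySem.Str.len b.1) : pyBmStep path (some b) p = some b := by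
  unfold pyBmStep; rw [h]
  show (if (true && decide (PySem.Str.len b.1 < PySem.Str.len p.1)) = true then some p else some b) = some b
  rw [decide_eq_false (not_lt.mpr hge)]
  simp

-- a startswith hit is a prefix
theorem pv_sw_prefix {path m : String} (h : PySem.Str.startswith path m = true) :
    m.toList <+: path.toList := by
  rw [PySem.Str.startswith_eq] at h
  exact (PySem.Chars.startswith_iff _ _).mp h

-- two matches of the same length are the same string
theorem pv_match_eq_of_len_eq {path a b : String}
    (ha : PySem.Str.startswith path a = true) (hb : PySem.Str.startswith path b = true)
    (hlen : PySem.Str.len a = PySem.Str.len b) : a = b := by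
  have hla : a.toList.length = b.toList.length := by
    have := hlen
    rw [PySem.Str.len_eq, PySem.Str.len_eq] at this
    exact_mod_cast this
  have h := List.prefix_or_prefix_of_prefix (pv_sw_prefix ha) (pv_sw_prefix hb)
  apply String.toList_inj.mp
  rcases h with h | h
  · exact h.eq_of_length hla
  · exact (h.eq_of_length hla.symm).symm

-- find? on a key-descending list returns a match of maximal key
theorem pv_find?_pairwise_max {l : List String} {p : String → Bool} {m : String}
    (hpw : l.Pairwise (fun a b => PySem.Str.len b ≤ PySem.Str.len a))
    (h : l.find? p = some m) :
    ∀ y ∈ l, p y = true → PySem.Str.len y ≤ PySem.Str.len m := by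
  induction l with
  | nil => simp at h
  | cons a t ih =>
    rcases List.pairwise_cons.mp hpw with ⟨hhead, htail⟩
    intro y hy hpy
    cases hpa : p a with
    | true =>
      rw [List.find?_cons, hpa] at h
      have ham : a = m := by simpa using h
      subst ham
      rcases List.mem_cons.mp hy with hc | hc
      · subst hc; exact le_refl _
      · exact hhead y hc
    | false =>
      rw [List.find?_cons, hpa] at h
      rcases List.mem_cons.mp hy with hc | hc
      · subst hc; rw [hpy] at hpa; exact absurd hpa (by simp)
      · exact ih htail h y hc hpy

-- if nothing in l matches, the bestMatch fold is the identity
theorem pv_bm_none (path : String) (l : List (String × String)) (s : Option (String × String))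
    (h : ∀ q ∈ l, PySem.Str.startswith path q.1 = false) :
    l.foldl (pyBmStep path) s = s := by
  induction l generalizing s with
  | nil => rfl
  | cons q t ih =>
    rw [List.foldl_cons, pv_bmStep_no s (h q (by simp))]
    exact ih s (fun r hr => h r (by simp [hr]))

-- once the fold holds the strict maximum, it keeps it
theorem pv_bm_stay (path m : String) (v : String) (l : List (String × String))
    (h : ∀ q ∈ l, PySem.Str.startswith path q.1 = true → q = (m, v) ∨ PySem.Str.len q.1 < PySem.Str.len m) :
    l.foldl (pyBmStep path) (some (m, v)) = some (m, v) := by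
  induction l with
  | nil => rfl
  | cons q t ih =>
    have hstep : pyBmStep path (some (m, v)) q = some (m, v) := by
      by_cases hq : PySem.Str.startswith path q.1 = true
      · rcases h q (by simp) hq with hq2 | hq2
        · subst hq2; exact pv_bmStep_ge hq (le_refl _)
        · exact pv_bmStep_ge hq (le_of_lt hq2)
      · exact pv_bmStep_no _ (eq_false_of_ne_true hq)
    rw [List.foldl_cons, hstep]
    exact ih (fun r hr hpr => h r (by simp [hr]) hpr)

-- the fold reaches the strict maximum (m, v) from any dominated state
theorem pv_bm_reach (path m v : String) (l : List (String × String))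
    (s : Option (String × String))
    (hmem : (m, v) ∈ l)
    (hm : PySem.Str.startswith path m = true)
    (h : ∀ q ∈ l, PySem.Str.startswith path q.1 = true → q = (m, v) ∨ PySem.Str.len q.1 < PySem.Str.len m)
    (hs : s = none ∨ ∃ a, PySem.Str.startswith path a.1 = true ∧ PySem.Str.len a.1 < PySem.Str.len m ∧ s = some a) :
    l.foldl (pyBmStep path) s = some (m, v) := by
  induction l generalizing s with
  | nil => simp at hmem
  | cons q t ih =>
    have htail : ∀ r ∈ t, PySem.Str.startswith path r.1 = true → r = (m, v) ∨ PySem.Str.len r.1 < PySem.Str.len m :=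
      fun r hr hpr => h r (by simp [hr]) hpr
    by_cases hq : q = (m, v)
    · subst hq
      have hstep : pyBmStep path s (m, v) = some (m, v) := by
        rcases hs with hs | ⟨a, ha1, ha2, hs⟩
        · subst hs; exact pv_bmStep_none hm
        · subst hs; exact pv_bmStep_lt hm ha2
      rw [List.foldl_cons, hstep]
      exact pv_bm_stay path m v t htail
    · have hmem' : (m, v) ∈ t := by
        rcases List.mem_cons.mp hmem with h' | h'
        · exact absurd h'.symm hq
        · exact h'
      have hnext : pyBmStep path s q = s ∨
          ∃ a, PySem.Str.startswith path a.1 = true ∧ PySem.Str.len a.1 < PySem.Str.len m ∧ pyBmStep path s q = some a := by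
        by_cases hpq : PySem.Str.startswith path q.1 = true
        · have hlt : PySem.Str.len q.1 < PySem.Str.len m := by
            rcases h q (by simp) hpq with h' | h'
            · exact absurd h' hq
            · exact h'
          rcases s with _ | b
          · exact Or.inr ⟨q, hpq, hlt, pv_bmStep_none hpq⟩
          · by_cases hlb : PySem.Str.len b.1 < PySem.Str.len q.1
            · exact Or.inr ⟨q, hpq, hlt, pv_bmStep_lt hpq hlb⟩
            · exact Or.inl (pv_bmStep_ge hpq (not_lt.mp hlb))
        · exact Or.inl (pv_bmStep_no _ (eq_false_of_ne_true hpq))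
      rw [List.foldl_cons]
      rcases hnext with hn | ⟨a, ha1, ha2, hn⟩
      · rw [hn]; exact ih s hmem' htail hs
      · rw [hn]
        exact ih _ hmem' htail (Or.inr ⟨a, ha1, ha2, rfl⟩)

-- per-path: A's chosen (mountpoint, device) equals B's bestMatch
theorem pv_choice_eq (mountpoints : List (String × String)) (path : String) :
    (match (PySem.List.sorted (PySem.Dict.ofList mountpoints).keys (fun s => PySem.Str.len s) true).find?
        (fun m => PySem.Str.startswith path m) with
     | none => (none : Option (String × String))
     | some m => some (m, ((PySem.Dict.ofList mountpoints).get? m).getD ""))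
    = pyBestMatch path (PySem.Dict.ofList mountpoints).items := by
  set d := PySem.Dict.ofList mountpoints with hd
  set sm := PySem.List.sorted d.keys (fun s => PySem.Str.len s) true with hsm
  have hnd : d.keys.Nodup := PySem.Dict.nodup_keys_ofList mountpoints
  cases hfind : sm.find? (fun m => PySem.Str.startswith path m) with
  | none =>
    have hno : ∀ q ∈ d.items, PySem.Str.startswith path q.1 = false := by
      intro q hq
      have hk : q.1 ∈ d.keys := PySem.Dict.mem_keys_of_mem_items d hq
      have hk' : q.1 ∈ sm := (PySem.List.mem_sorted _ _ _ _).mpr hk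
      exact eq_false_of_ne_true (List.find?_eq_none.mp hfind q.1 hk')
    exact (pv_bm_none path d.items none hno).symm
  | some m =>
    have hm : PySem.Str.startswith path m = true := List.find?_some hfind
    have hmk : m ∈ d.keys := (PySem.List.mem_sorted _ _ _ _).mp (List.mem_of_find?_eq_some hfind)
    obtain ⟨p, hp, hp1⟩ := List.mem_map.mp (by exact hmk)
    obtain ⟨v, hv⟩ : ∃ v, (m, v) ∈ d.items := ⟨p.2, by rw [← hp1]; exact hp⟩
    have hget : d.get? m = some v := PySem.Dict.get?_of_mem_items d hv hnd
    have hmax : ∀ y ∈ sm, PySem.Str.startswith path y = true → PySem.Str.len y ≤ PySem.Str.len m :=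
      pv_find?_pairwise_max (PySem.List.sorted_pairwise_rev d.keys (fun s => PySem.Str.len s)) hfind
    have hdom : ∀ q ∈ d.items, PySem.Str.startswith path q.1 = true →
        q = (m, v) ∨ PySem.Str.len q.1 < PySem.Str.len m := by
      intro q hq hpq
      have hk' : q.1 ∈ sm := (PySem.List.mem_sorted _ _ _ _).mpr (PySem.Dict.mem_keys_of_mem_items d hq)
      have hle := hmax q.1 hk' hpq
      rcases lt_or_eq_of_le hle with hlt | heq
      · exact Or.inr hlt
      · left
        have hq1 : q.1 = m := pv_match_eq_of_len_eq hpq hm heq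
        have hgetq : d.get? q.1 = some q.2 := PySem.Dict.get?_of_mem_items d (by simpa using hq) hnd
        rw [hq1, hget] at hgetq
        have hqv : q.2 = v := by injection hgetq.symm
        calc q = (q.1, q.2) := rfl
          _ = (m, v) := by rw [hq1, hqv]
    have hr := pv_bm_reach path m v d.items none hv hm hdom (Or.inl rfl)
    unfold pyBestMatch
    rw [hr]
    show some (m, (d.get? m).getD "") = some (m, v)
    rw [hget]
    rfl

-- the two grouping steps coincide
theorem pv_step_eq (mountpoints : List (String × String)) :
    pyAStep (PySem.Dict.ofList mountpoints)
        (PySem.List.sorted (PySem.Dict.ofList mountpoints).keys (fun s => PySem.Str.len s) true)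
      = fun acc path =>
        match pyBestMatch path (PySem.Dict.ofList mountpoints).items with
        | none => acc
        | some best => acc.modify best.2 [] (· ++ [path]) := by
  funext acc path
  have hc := pv_choice_eq mountpoints path
  simp only [pyAStep]
  cases hfind : (PySem.List.sorted (PySem.Dict.ofList mountpoints).keys (fun s => PySem.Str.len s) true).find?
      (fun m => PySem.Str.startswith path m) with
  | none =>
    rw [hfind] at hc
    rw [← hc]
  | some m =>
    rw [hfind] at hc
    rw [← hc]
    show (if acc.contains (((PySem.Dict.ofList mountpoints).get? m).getD "") = true
        then acc.modify (((PySem.Dict.ofList mountpoints).get? m).getD "") [] (· ++ [path])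
        else acc.insert (((PySem.Dict.ofList mountpoints).get? m).getD "") [path])
      = acc.modify (((PySem.Dict.ofList mountpoints).get? m).getD "") [] (· ++ [path])
    set device := ((PySem.Dict.ofList mountpoints).get? m).getD "" with hdev
    by_cases hcon : acc.contains device = true
    · rw [if_pos hcon]
    · have hcon' : acc.contains device = false := eq_false_of_ne_true hcon
      rw [if_neg hcon]
      -- insert of a fresh key = modify with default []
      unfold PySem.Dict.modify
      rw [PySem.Dict.getD_of_not_contains acc [] hcon']
      rfl

-- ===== VERDICT (by name: the statement is the Claim_ definition above) =====
theorem map_paths_to_devices_spec : Claim_equal_map_paths_to_devices := by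
  intro wordslab_paths mountpoints _
  unfold Spec_map_paths_to_devices
  show map_paths_to_devices wordslab_paths mountpoints = map_paths_to_devices_alt wordslab_paths mountpoints
  simp only [map_paths_to_devices, map_paths_to_devices_alt]
  rw [pv_step_eq mountpoints]
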